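-- pv_equiv track=rewrite | github.com/Otto-Schmitz/udp_server-Information_theory_class-UNISINOS | inteiro_codigos.py | fibonacci_extrair_um
-- ===== SOURCE A (Python) =====
-- _FIB: list[int] = [1, 2]
--
-- def _ensure_fib_length(tamanho: int) -> None:
--     """Garante len(_FIB) >= tamanho (adiciona termos só quando falta)."""
--     while len(_FIB) < tamanho:
--         _FIB.append(_FIB[-1] + _FIB[-2])
--
-- def _fib_linha_para_codificar(n: int) -> list[int]:
--     """Prefixo mínimo [1,2,…] com último termo >= n (igual ao algoritmo antigo)."""
--     _ensure_fib_length(2)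
--     i = 1
--     while _FIB[i] < n:
--         i += 1
--         _ensure_fib_length(i + 1)
--     return _FIB[: i + 1]
--
-- def fibonacci_codificar(n: int) -> str:
--     if n < 1:
--         raise ValueError("Fibonacci exige n >= 1")
--     fib = _fib_linha_para_codificar(n)
--     c = [0] * len(fib)
--     r = n
--     i = len(fib) - 1
--     while i >= 0:
--         if fib[i] <= r:
--             c[i] = 1
--             r -= fib[i]
--             i -= 2
--         else:
--             i -= 1
--     while c and c[-1] == 0:
--         c.pop()
--     if not c:
--         c = [1]
--     return "".join(str(x) for x in c) + "11"
--
-- def _zeckendorf_corpo_para_int(corpo: str) -> int: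
--     if not corpo:
--         return 0
--     L = len(corpo)
--     _ensure_fib_length(L)
--     return sum(int(b) * _FIB[k] for k, b in enumerate(corpo))
--
-- def fibonacci_extrair_um(bits: str) -> tuple[int, str]:
--     """Um código termina em 11; o corpo (antes do 11) não contém 11 (Zeckendorf)."""
--     n = len(bits)
--     j = 3
--     while j <= n:
--         if bits[j - 2 : j] != "11":
--             j += 1
--             continue
--         corpo = bits[: j - 2]
--         if "11" in corpo:
--             j += 1
--             continue
--         val = _zeckendorf_corpo_para_int(corpo)
--         if val < 1:
--             j += 1
--             continue
--         if fibonacci_codificar(val) != bits[:j]: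
--             j += 1
--             continue
--         return val, bits[j:]
--     raise ValueError("terminador Fibonacci ausente ou fluxo truncado")
-- ===== SOURCE B (Python) =====
-- _FIB = [1, 2]
--
-- def _ensure_fib_length(tamanho):
--     while len(_FIB) < tamanho:
--         _FIB.append(_FIB[-1] + _FIB[-2])
--
-- def _fib_linha_para_codificar(n):
--     _ensure_fib_length(2)
--     i = 1
--     while _FIB[i] < n:
--         i += 1
--         _ensure_fib_length(i + 1)
--     return _FIB[: i + 1]
--
-- def fibonacci_codificar(n):
--     if n < 1:
--         raise ValueError("Fibonacci exige n >= 1")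
--     fib = _fib_linha_para_codificar(n)
--     c = [0] * len(fib)
--     r = n
--     i = len(fib) - 1
--     while i >= 0:
--         if fib[i] <= r:
--             c[i] = 1
--             r -= fib[i]
--             i -= 2
--         else:
--             i -= 1
--     while c and c[-1] == 0:
--         c.pop()
--     if not c:
--         c = [1]
--     return "".join(str(x) for x in c) + "11"
--
-- def _zeckendorf_corpo_para_int(corpo):
--     if not corpo:
--         return 0
--     L = len(corpo)
--     _ensure_fib_length(L)
--     return sum(int(b) * _FIB[k] for k, b in enumerate(corpo))
--
-- def fibonacci_extrair_um(bits):
--     idx = bits.find("11", 1)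
--     if idx == -1:
--         raise ValueError("terminador Fibonacci ausente ou fluxo truncado")
--     for i in (idx, idx + 1):
--         if bits[i : i + 2] != "11" or "11" in bits[:i]:
--             continue
--         val = _zeckendorf_corpo_para_int(bits[:i])
--         if val >= 1 and fibonacci_codificar(val) == bits[: i + 2]:
--             return val, bits[i + 2 :]
--     raise ValueError("terminador Fibonacci ausente ou fluxo truncado")
-- ===== Notes on version B (the rewrite author's own statement) =====
-- stated objective: simpler
-- what changed: A scans every position j of the stream revalidating from scratch; B jumps straight to the first occurrence of the double-one terminator via str.find and validates at most the two possible overlapping terminator candidates there (any later candidate's body necessarily contains a double-one and can never validate).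
import Mathlib
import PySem

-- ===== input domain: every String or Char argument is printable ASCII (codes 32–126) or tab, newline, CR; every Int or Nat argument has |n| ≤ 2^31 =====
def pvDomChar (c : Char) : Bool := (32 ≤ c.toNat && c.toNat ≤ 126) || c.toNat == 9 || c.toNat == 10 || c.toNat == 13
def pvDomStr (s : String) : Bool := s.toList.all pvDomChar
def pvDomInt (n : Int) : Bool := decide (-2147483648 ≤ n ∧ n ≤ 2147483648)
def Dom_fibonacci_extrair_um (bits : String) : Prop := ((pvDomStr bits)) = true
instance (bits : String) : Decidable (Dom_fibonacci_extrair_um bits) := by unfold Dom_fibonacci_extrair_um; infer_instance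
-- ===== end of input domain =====

-- B replaces A's whole-stream scan by one find('11', 1) plus at most two candidate validations (simpler/faster straight-line decode).
-- Every Python ValueError path (of A and of B) is modeled by the sentinel (0, ""); Pre_ excludes exactly those inputs.
-- The module-level memo table _FIB is deterministic, so both ports recompute its (identical) prefix purely.

-- ===== PORT A =====
-- shared module helpers (identical lines in Source A and Source B)

-- _ensure_fib_length: the global _FIB after ensuring length t (grown from [1,2]); value-faithful pure recomputation
def pvEnsureFib (l : List Int) (t : Nat) : List Int :=
  if _h : l.length < t then
    pvEnsureFib (l ++ [PySem.List.pyGetD l (-1) 0 + PySem.List.pyGetD l (-2) 0]) t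
  else l
termination_by t - l.length
decreasing_by simp; omega

def pvFIB (t : Nat) : List Int := pvEnsureFib [1, 2] t

-- while _FIB[i] < n: i += 1  (fuel = n.natAbs + 2 suffices since fib i ≥ i + 1)
def pvFibLinhaLoop (n : Int) (i : Nat) : Nat → Nat
  | 0 => i
  | fuel + 1 =>
    if PySem.List.pyGetD (pvFIB (i + 1)) (i : Int) 0 < n then pvFibLinhaLoop n (i + 1) fuel else i

def pvFibLinha (n : Int) : List Int :=
  let i := pvFibLinhaLoop n 1 (n.natAbs + 2)
  PySem.List.slice (pvFIB (i + 1)) none (some ((i : Int) + 1))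

-- the while i >= 0 loop of fibonacci_codificar (i decreases each turn, fuel = len + 1 suffices)
def pvCodLoop (fib : List Int) (c : List Int) (r : Int) (i : Int) : Nat → List Int
  | 0 => c
  | fuel + 1 =>
    if 0 ≤ i then
      if PySem.List.pyGetD fib i 0 ≤ r then
        pvCodLoop fib (c.set i.toNat 1) (r - PySem.List.pyGetD fib i 0) (i - 2) fuel
      else pvCodLoop fib c r (i - 1) fuel
    else c

-- while c and c[-1] == 0: c.pop()
def pvStripZeros (c : List Int) : List Int :=
  if h : c ≠ [] ∧ PySem.List.pyGetD c (-1) 0 = 0 then pvStripZeros c.dropLast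
  else c
termination_by c.length
decreasing_by have := h.1; cases c with | nil => simp at this | cons a t => simp

def pvCodificar (n : Int) : Option (List Char) :=
  if n < 1 then none   -- raise ValueError("Fibonacci exige n >= 1")
  else
    let fib := pvFibLinha n
    let c := List.replicate fib.length (0 : Int)
    let c := pvCodLoop fib c n ((fib.length : Int) - 1) (fib.length + 1)
    let c := pvStripZeros c
    let c := if c = [] then [(1 : Int)] else c
    some ((c.map PySem.Int.toChars).flatten ++ ['1', '1'])

-- sum(int(b) * _FIB[k] for k, b in enumerate(corpo)); none = ValueError from int(b)
def pvZeckSum (fib : List Int) : List (Int × Char) → Option Int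
  | [] => some 0
  | (k, b) :: rest =>
    match PySem.Int.ofChars? [b] with
    | none => none
    | some d =>
      match pvZeckSum fib rest with
      | none => none
      | some s => some (d * PySem.List.pyGetD fib k 0 + s)

def pvZeck (corpo : List Char) : Option Int :=
  if corpo = [] then some 0
  else pvZeckSum (pvFIB corpo.length) (PySem.List.enumerate corpo 0)

-- A's while j <= n scan; none = ValueError (loop exhausted, or int(b) raised inside)
def pvLoopA (s : List Char) (n j : Nat) : Option (Int × List Char) :=
  if _hj : j ≤ n then
    if PySem.Chars.slice s (some ((j : Int) - 2)) (some (j : Int)) ≠ ['1', '1'] then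
      pvLoopA s n (j + 1)
    else
      let corpo := PySem.Chars.slice s none (some ((j : Int) - 2))
      if PySem.Chars.isIn ['1', '1'] corpo then pvLoopA s n (j + 1)
      else
        match pvZeck corpo with
        | none => none
        | some val =>
          if val < 1 then pvLoopA s n (j + 1)
          else
            match pvCodificar val with
            | none => none
            | some cod =>
              if cod ≠ PySem.Chars.slice s none (some (j : Int)) then pvLoopA s n (j + 1)
              else some (val, PySem.Chars.slice s (some (j : Int)) none)
  else none
termination_by n + 1 - j
decreasing_by all_goals omega

def fibonacci_extrair_um (bits : String) : Int × String :=
  let s := bits.toList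
  match pvLoopA s s.length 3 with
  | some (v, rest) => (v, String.ofList rest)
  | none => (0, "")   -- ValueError; excluded by Pre_

-- ===== PORT B =====
-- one candidate i of Source B's two-element for loop:
-- none = continue, some none = raise propagated from int(b), some (some r) = return r
def pvCand (s : List Char) (i : Nat) : Option (Option (Int × List Char)) :=
  if PySem.Chars.slice s (some (i : Int)) (some ((i : Int) + 2)) ≠ ['1', '1'] ∨
     PySem.Chars.isIn ['1', '1'] (PySem.Chars.slice s none (some (i : Int))) then none
  else
    match pvZeck (PySem.Chars.slice s none (some (i : Int))) with
    | none => some none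
    | some val =>
      if 1 ≤ val then
        match pvCodificar val with
        | none => some none
        | some cod =>
          if cod = PySem.Chars.slice s none (some ((i : Int) + 2)) then
            some (some (val, PySem.Chars.slice s (some ((i : Int) + 2)) none))
          else none
      else none

def fibonacci_extrair_um_alt (bits : String) : Int × String :=
  let s := bits.toList
  let idx := PySem.Chars.findFrom s ['1', '1'] 1 none
  if idx = -1 then (0, "")   -- raise ValueError
  else
    match pvCand s idx.toNat with
    | some (some r) => (r.1, String.ofList r.2)
    | some none => (0, "")
    | none =>
      match pvCand s (idx.toNat + 1) with
      | some (some r) => (r.1, String.ofList r.2)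
      | some none => (0, "")
      | none => (0, "")   -- raise ValueError after the two candidates

-- ===== PRECONDITION & SPEC =====
-- Pre_ excludes exactly the inputs on which A raises ValueError (no well-terminated canonical
-- Zeckendorf code at the head of the stream, or a non-digit character inside the only candidate body).
def Pre_fibonacci_extrair_um (bits : String) : Prop :=
  ∃ i < bits.toList.length, 1 ≤ i ∧ i + 2 ≤ bits.toList.length ∧
    (bits.toList.drop i).take 2 = ['1', '1'] ∧
    (bits.toList.take i).all (fun ch => ch == '0' || ch == '1') = true ∧
    PySem.Chars.isIn ['1', '1'] (bits.toList.take i) = false ∧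
    (bits.toList.take i).getLast? = some '1'
instance (bits : String) : Decidable (Pre_fibonacci_extrair_um bits) := by
  unfold Pre_fibonacci_extrair_um; infer_instance

def pvWitness_fibonacci_extrair_um : String := "111"

def Spec_fibonacci_extrair_um (bits : String) (out : Int × String) : Prop := out = fibonacci_extrair_um_alt bits
instance (bits : String) (out : Int × String) : Decidable (Spec_fibonacci_extrair_um bits out) := by unfold Spec_fibonacci_extrair_um; infer_instance

-- ===== CLAIM (what is proved, stated in full; the proofs are below) =====
def Claim_equal_fibonacci_extrair_um : Prop := ∀ (bits : String), Dom_fibonacci_extrair_um bits → Pre_fibonacci_extrair_um bits → Spec_fibonacci_extrair_um bits (fibonacci_extrair_um bits)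


-- ===== LEMMAS AND PROOFS =====

-- slice normal forms shared by both ports
theorem pvSlice2 (s : List Char) (i : Nat) :
    PySem.Chars.slice s (some (i : Int)) (some ((i : Int) + 2)) = (s.drop i).take 2 := by
  have := PySem.List.slice_natCast_add (xs := s) (j := i) (n := 2); simpa using this

theorem pvSliceTo (s : List Char) (j : Nat) :
    PySem.Chars.slice s none (some (j : Int)) = s.take j := by simp

theorem pvSliceTo2 (s : List Char) (i : Nat) :
    PySem.Chars.slice s none (some ((i : Int) + 2)) = s.take (i + 2) := by
  have := PySem.List.slice_to_natCast (xs := s) (b := i + 2); simp at this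
  simpa using this

theorem pvSliceFrom2 (s : List Char) (i : Nat) :
    PySem.Chars.slice s (some ((i : Int) + 2)) none = s.drop (i + 2) := by
  have := PySem.List.slice_from_natCast (xs := s) (a := i + 2); simp at this
  simpa using this

-- A's loop body at a live index j is exactly B's candidate check at i = j - 2
theorem pvStepA (s : List Char) (n j : Nat) (h2 : 2 ≤ j) (hj : j ≤ n) :
    pvLoopA s n j = (match pvCand s (j - 2) with
      | none => pvLoopA s n (j + 1)
      | some none => none
      | some (some r) => some r) := by
  have e1 : (j : Int) - 2 = ((j - 2 : Nat) : Int) := by omega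
  have e2 : (j : Int) = ((j - 2 : Nat) : Int) + 2 := by omega
  rw [pvLoopA, dif_pos hj, e1, e2]
  unfold pvCand
  simp only [pvSlice2, pvSliceTo, pvSliceTo2, pvSliceFrom2]
  by_cases h1 : (s.drop (j - 2)).take 2 = ['1', '1']
  · by_cases hIn : PySem.Chars.isIn ['1', '1'] (s.take (j - 2)) = true
    · simp [h1, hIn]
    · simp only [h1, hIn, ne_eq, not_true_eq_false, if_false, false_or, Bool.false_eq_true]
      cases hz : pvZeck (s.take (j - 2)) with
      | none => rfl
      | some val =>
        by_cases hv : val < 1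
        · have hv' : ¬ (1 ≤ val) := by omega
          simp [hv, hv']
        · have hv' : 1 ≤ val := by omega
          cases hc : pvCodificar val with
          | none => simp [hv, hv', hc]
          | some cod =>
            by_cases he : cod = s.take (j - 2 + 2)
            · simp [hv, hv', hc, he]
            · simp [hv, hv', hc, he]
  · simp [h1]

-- a candidate with no terminator is skipped
theorem pvCand_none_of_noterm (s : List Char) (i : Nat)
    (h : (s.drop i).take 2 ≠ ['1', '1']) : pvCand s i = none := by
  unfold pvCand
  rw [if_pos]
  left
  rw [pvSlice2]
  exact h

-- a candidate whose terminator would overrun the stream is skipped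
theorem pvCand_none_of_short (s : List Char) (i : Nat)
    (h : s.length < i + 2) : pvCand s i = none := by
  apply pvCand_none_of_noterm
  intro he
  have hl : ((s.drop i).take 2).length = 2 := by rw [he]; rfl
  simp at hl
  omega

-- skipping the scan from j up to the first candidate k + 2
theorem pvLoopA_upto (s : List Char) (n k : Nat)
    (hmin : ∀ i, 1 ≤ i → i < k → (s.drop i).take 2 ≠ ['1', '1']) :
    ∀ d j, 3 ≤ j → j + d = k + 2 → k + 2 ≤ n → pvLoopA s n j = pvLoopA s n (k + 2) := by
  intro d
  induction d with
  | zero =>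
    intro j h3 hjd _
    obtain rfl : j = k + 2 := by omega
    rfl
  | succ d ih =>
    intro j h3 hjd hn
    rw [pvStepA s n j (by omega) (by omega),
        pvCand_none_of_noterm s (j - 2) (hmin (j - 2) (by omega) (by omega))]
    exact ih (j + 1) (by omega) (by omega) hn

-- once the scan has passed k + 1, every body contains the '11' at k: the loop dies out
theorem pvLoopA_tail (s : List Char) (n k : Nat)
    (hterm : (s.drop k).take 2 = ['1', '1']) :
    ∀ m j, k + 4 ≤ j → n + 1 ≤ j + m → pvLoopA s n j = none := by
  intro m
  induction m with
  | zero =>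
    intro j hj hm
    rw [pvLoopA, dif_neg (by omega)]
  | succ m ih =>
    intro j hj hm
    by_cases hjn : j ≤ n
    · rw [pvLoopA, dif_pos hjn]
      by_cases h1 : PySem.Chars.slice s (some ((j : Int) - 2)) (some (j : Int)) = ['1', '1']
      · rw [if_neg (by simpa using h1)]
        have hIn : PySem.Chars.isIn ['1', '1'] (PySem.Chars.slice s none (some ((j : Int) - 2))) = true := by
          have e1 : (j : Int) - 2 = ((j - 2 : Nat) : Int) := by omega
          rw [e1, pvSliceTo, PySem.Chars.isIn_iff_infix]
          have hpre : ['1', '1'] <+: (s.take (j - 2)).drop k := by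
            have hl2 : (['1', '1'] : List Char).length = 2 := rfl
            rw [List.drop_take, List.prefix_iff_eq_take, hl2, List.take_take]
            have hmn : min 2 (j - 2 - k) = 2 := by omega
            rw [hmn, hterm]
          exact hpre.isInfix.trans (List.drop_suffix k _).isInfix
        rw [if_pos hIn]
        exact ih (j + 1) (by omega) (by omega)
      · rw [if_pos (by simpa using h1)]
        exact ih (j + 1) (by omega) (by omega)
    · rw [pvLoopA, dif_neg hjn]

-- if the stream holds no terminator at all (from index 1 on), the scan returns none
theorem pvLoopA_none (s : List Char) (n : Nat)
    (hmin : ∀ i, 1 ≤ i → (s.drop i).take 2 ≠ ['1', '1']) :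
    ∀ m j, 3 ≤ j → n + 1 ≤ j + m → pvLoopA s n j = none := by
  intro m
  induction m with
  | zero => intro j hj hm; rw [pvLoopA, dif_neg (by omega)]
  | succ m ih =>
    intro j hj hm
    by_cases hjn : j ≤ n
    · rw [pvStepA s n j (by omega) hjn,
          pvCand_none_of_noterm s (j - 2) (hmin (j - 2) (by omega))]
      exact ih (j + 1) (by omega) (by omega)
    · rw [pvLoopA, dif_neg hjn]

theorem pv_equal (bits : String) : fibonacci_extrair_um bits = fibonacci_extrair_um_alt bits := by
  simp only [fibonacci_extrair_um, fibonacci_extrair_um_alt]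
  set s := bits.toList with hs
  by_cases hlen : s.length = 0
  · have hnil : s = [] := List.eq_nil_of_length_eq_zero hlen
    rw [hnil]
    rw [pvLoopA, dif_neg (by simp)]
    rfl
  · have h1len : 1 ≤ s.length := by omega
    by_cases hr : PySem.Chars.findFrom s ['1', '1'] 1 none = -1
    · -- no terminator reachable from index 1: A's scan exhausts, B raises at once
      have hnin : ¬ (['1', '1'] <:+: s.drop 1) := by
        have h := (PySem.Chars.findFrom_natCast_eq_neg_one_iff s ['1', '1'] 1 h1len).mp
          (by exact_mod_cast hr)
        simpa using h
      have hmin : ∀ i, 1 ≤ i → (s.drop i).take 2 ≠ ['1', '1'] := by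
        intro i hi he
        apply hnin
        have hpre : ['1', '1'] <+: s.drop i := by
          have hl2 : (['1', '1'] : List Char).length = 2 := rfl
          rw [List.prefix_iff_eq_take, hl2, he]
        have hdd : s.drop i = (s.drop 1).drop (i - 1) := by
          rw [List.drop_drop]; congr 1; omega
        rw [hdd] at hpre
        exact hpre.isInfix.trans (List.drop_suffix (i - 1) _).isInfix
      rw [pvLoopA_none s s.length hmin (s.length + 1) 3 (by omega) (by omega), if_pos hr]
    · have hspec := PySem.Chars.findFrom_natCast_spec s ['1', '1'] 1 h1len (by exact_mod_cast hr)
      rw [if_neg hr]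
      set r := PySem.Chars.findFrom s ['1', '1'] 1 none with hrdef
      set k := r.toNat with hkdef
      have hr1 : (1 : Int) ≤ r := by exact_mod_cast hspec.1
      have hk1 : 1 ≤ k := by omega
      have hterm : (s.drop k).take 2 = ['1', '1'] := (List.prefix_iff_eq_take.mp hspec.2.1).symm
      have hk2 : k + 2 ≤ s.length := by
        have hle := hspec.2.1.length_le
        simp at hle
        omega
      have hmin : ∀ i, 1 ≤ i → i < k → (s.drop i).take 2 ≠ ['1', '1'] := by
        intro i hi hik he
        refine hspec.2.2 i hi hik ?_
        have hl2 : (['1', '1'] : List Char).length = 2 := rfl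
        rw [List.prefix_iff_eq_take, hl2, he]
      rw [pvLoopA_upto s s.length k hmin (k - 1) 3 (by omega) (by omega) hk2,
          pvStepA s s.length (k + 2) (by omega) hk2]
      have hkk : k + 2 - 2 = k := by omega
      rw [hkk]
      cases hc : pvCand s k with
      | some o => cases o <;> rfl
      | none =>
        by_cases hn3 : k + 3 ≤ s.length
        · rw [pvStepA s s.length (k + 3) (by omega) hn3]
          have hkk3 : k + 3 - 2 = k + 1 := by omega
          rw [hkk3]
          cases hc2 : pvCand s (k + 1) with
          | some o => cases o <;> rfl
          | none =>
            rw [pvLoopA_tail s s.length k hterm (s.length + 1) (k + 4) (by omega) (by omega)]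
        · rw [pvLoopA, dif_neg (by omega), pvCand_none_of_short s (k + 1) (by omega)]

-- ===== VERDICT (by name: the statement is the Claim_ definition above) =====
theorem fibonacci_extrair_um_spec : Claim_equal_fibonacci_extrair_um := by
  intro bits _ _
  unfold Spec_fibonacci_extrair_um
  exact pv_equal bits
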